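-- pv_equiv track=rewrite | github.com/br1brown/SanitizeLinkBot | sanitizer.py | _pick_charset
-- ===== SOURCE A (Python) =====
-- def _pick_charset(raw_ct_header: str | None) -> str:
--     # estrae charset dal Content-Type se presente
--     if raw_ct_header:
--         parts = raw_ct_header.lower().split(";")
--         for p in parts[1:]:
--             p = p.strip()
--             if p.startswith("charset="):
--                 return p.split("=", 1)[1].strip().strip('"').strip("'")
--     return "utf-8"
-- ===== SOURCE B (Python) =====
-- # Alternative: single in-place index scan over the lowercased header (no split
-- # list is built) with a shared predicate-trim helper instead of str.strip chains.
-- def _trim_by(pred, t):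
--     while t and pred(t[0]):
--         t = t[1:]
--     while t and pred(t[-1]):
--         t = t[:-1]
--     return t
--
-- def _pick_charset(raw_ct_header):
--     if raw_ct_header is None:
--         return "utf-8"
--     s = raw_ct_header.lower()
--     n = len(s)
--     i = 0
--     while i < n:
--         if s[i] == ";":
--             j = i + 1
--             while j < n and s[j].isspace():
--                 j += 1
--             if s[j:j+8] == "charset=":
--                 k = j + 8
--                 e = k
--                 while e < n and s[e] != ";":
--                     e += 1
--                 v = _trim_by(str.isspace, s[k:e])
--                 v = _trim_by(lambda c: c == '"', v)
--                 v = _trim_by(lambda c: c == "'", v)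
--                 return v
--         i += 1
--     return "utf-8"
-- ===== Notes on version B (the rewrite author's own statement) =====
-- stated objective: alternative
-- what changed: Replaces splitting the header into a list of semicolon-separated segments and looping over them with strip/startswith by a single in-place index scan that jumps from semicolon to semicolon, compares an 8-character slice against the charset key directly and trims via one shared predicate-trim helper, building no intermediate segment list.
import Mathlib
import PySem

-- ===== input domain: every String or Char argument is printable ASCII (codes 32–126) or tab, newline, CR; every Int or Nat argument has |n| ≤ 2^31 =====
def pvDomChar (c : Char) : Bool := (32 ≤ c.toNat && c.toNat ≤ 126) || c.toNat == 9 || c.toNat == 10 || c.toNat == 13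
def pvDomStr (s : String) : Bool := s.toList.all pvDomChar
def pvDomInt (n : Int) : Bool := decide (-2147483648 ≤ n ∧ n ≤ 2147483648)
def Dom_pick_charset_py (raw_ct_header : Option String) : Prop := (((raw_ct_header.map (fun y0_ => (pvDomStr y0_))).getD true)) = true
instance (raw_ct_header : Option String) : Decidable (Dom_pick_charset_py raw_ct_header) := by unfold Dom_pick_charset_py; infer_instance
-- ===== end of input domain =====

-- B replaces A's split(';')-into-a-list + strip/startswith segment loop by a single
-- in-place index scan with a shared predicate-trim helper (alternative decomposition,
-- same cost); return values proved equal on the whole domain.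


-- ===== PORT A =====
-- the 'for p in parts[1:]' loop; 'return' inside the loop = 'some', falling through = 'none'
def pickLoopA : List (List Char) → Option (List Char)
  | [] => none
  | p :: rest =>
      let q := PySem.Chars.strip p
      if PySem.Chars.startswith q "charset=".toList then
        -- p.split("=", 1)[1]: the index [1] always exists here because q starts with "charset="
        some (PySem.Chars.stripChars
                (PySem.Chars.stripChars
                  (PySem.Chars.strip ((PySem.List.pyGet? (PySem.Chars.splitOnMax q "=".toList 1) 1).getD []))
                  "\"".toList)
                "'".toList)
      else pickLoopA rest

def pick_charset_py (raw_ct_header : Option String) : String :=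
  match raw_ct_header with
  | none => "utf-8"
  | some s =>
      if s.toList.isEmpty then "utf-8"
      else
        match pickLoopA (PySem.List.slice
                (PySem.Chars.splitOn (PySem.Chars.lower s.toList) ";".toList) (some 1) none) with
        | some v => String.mk v
        | none => "utf-8"

-- ===== PORT B =====
-- _trim_by(pred, t): the two while loops peel matching characters off the front and
-- off the back; back-peeling is transcribed as dropWhile on the reversed list
def trimBy (p : Char → Bool) (t : List Char) : List Char :=
  ((t.dropWhile p).reverse.dropWhile p).reverse

-- the 'while i < n' scan: recursion over the remaining characters; at each ';' skip
-- whitespace, compare the next 8 characters with "charset=" (s[j:j+8] == "charset="),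
-- and on success take the value up to the next ';' and trim it three times
def scanB : List Char → Option (List Char)
  | [] => none
  | c :: rest =>
      if c = ';' then
        let t := rest.dropWhile PySem.Chars.isspace
        if t.take 8 = "charset=".toList then
          some (trimBy (· == '\'') (trimBy (· == '"')
                  (trimBy PySem.Chars.isspace ((t.drop 8).takeWhile (· ≠ ';')))))
        else scanB rest
      else scanB rest

def pick_charset_py_alt (raw_ct_header : Option String) : String :=
  match raw_ct_header with
  | none => "utf-8"
  | some s =>
      match scanB (PySem.Chars.lower s.toList) with
      | some v => String.mk v
      | none => "utf-8"

-- ===== PRECONDITION & SPEC =====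
def Spec_pick_charset_py (raw_ct_header : Option String) (out : String) : Prop := out = pick_charset_py_alt raw_ct_header
instance (raw_ct_header : Option String) (out : String) : Decidable (Spec_pick_charset_py raw_ct_header out) := by unfold Spec_pick_charset_py; infer_instance

-- ===== CLAIM (what is proved, stated in full; the proofs are below) =====
def Claim_equal_pick_charset_py : Prop := ∀ (raw_ct_header : Option String), Dom_pick_charset_py raw_ct_header → Spec_pick_charset_py raw_ct_header (pick_charset_py raw_ct_header)

-- ===== LEMMAS AND PROOFS =====

-- B-side trims are A's strip/stripChars
theorem trimBy_isspace (t : List Char) :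
    trimBy PySem.Chars.isspace t = PySem.Chars.strip t := rfl

theorem trimBy_quote (t : List Char) (q : Char) :
    trimBy (· == q) t = PySem.Chars.stripChars t [q] := by
  unfold PySem.Chars.stripChars trimBy
  have h : (fun (c : Char) => [q].contains c) = (fun (c : Char) => c == q) := by
    funext c; simp only [List.contains, List.elem]
    cases hc : c == q <;> simp
  rw [h]

-- s[j:j+8] == "charset=" is prefix testing
theorem take8_iff (t : List Char) :
    (t.take 8 = "charset=".toList) ↔ ("charset=".toList.isPrefixOf t = true) := by
  rw [List.isPrefixOf_iff_prefix, List.prefix_iff_eq_take]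
  constructor <;> intro h <;> simp_all

-- proof-side structural splitter: what Python's split(";") computes
def segs : List Char → List (List Char)
  | [] => [[]]
  | c :: rest => if c = ';' then [] :: segs rest else (segs rest).modifyHead (c :: ·)

theorem segs_ne_nil (l : List Char) : segs l ≠ [] := by
  cases l with
  | nil => simp [segs]
  | cons c rest =>
    simp only [segs]
    split
    · simp
    · cases h : segs rest with
      | nil => exact absurd h (segs_ne_nil rest)
      | cons a t => simp [h]

theorem splitOn_go_spec (fuel : Nat) (l cur : List Char) (acc : List (List Char))
    (h : l.length ≤ fuel) :
    PySem.Chars.splitOn.go [';'] fuel l cur acc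
      = acc.reverse ++ (segs l).modifyHead (cur.reverse ++ ·) := by
  induction fuel generalizing l cur acc with
  | zero =>
      have hl : l = [] := List.length_eq_zero_iff.mp (Nat.le_zero.mp h)
      subst hl
      rw [PySem.Chars.splitOn.go]
      simp [segs]
  | succ n ih =>
      cases l with
      | nil =>
          rw [PySem.Chars.splitOn.go]
          simp [segs]
          omega
      | cons c rest =>
          by_cases hc : c = ';'
          · subst hc
            rw [PySem.Chars.splitOn.go]
            simp only [List.isPrefixOf, BEq.rfl, Bool.true_and, if_pos]
            rw [show List.drop [';'].length (';' :: rest) = rest from rfl]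
            rw [ih rest [] (cur.reverse :: acc) (by simpa using h)]
            cases hs : segs rest with
            | nil => exact absurd hs (segs_ne_nil rest)
            | cons a t => simp [segs, hs]
          · rw [PySem.Chars.splitOn.go]
            have hpre : [';'].isPrefixOf (c :: rest) = false := by
              simp [List.isPrefixOf, Ne.symm hc]
            simp only [hpre, Bool.false_eq_true, if_false]
            rw [ih rest (c :: cur) acc (by simpa using Nat.le_of_succ_le_succ (by simpa using h))]
            cases hs : segs rest with
            | nil => exact absurd hs (segs_ne_nil rest)
            | cons a t => simp [segs, hc, hs]

theorem splitOn_eq_segs (l : List Char) :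
    PySem.Chars.splitOn l [';'] = segs l := by
  unfold PySem.Chars.splitOn
  rw [splitOn_go_spec l.length.succ l [] [] (Nat.le_succ _)]
  cases hs : segs l with
  | nil => exact absurd hs (segs_ne_nil l)
  | cons a t => simp

theorem segs_append (u v : List Char) (hu : ';' ∉ u) :
    segs (u ++ v) = (segs v).modifyHead (u ++ ·) := by
  induction u with
  | nil =>
      cases hs : segs v with
      | nil => exact absurd hs (segs_ne_nil v)
      | cons a t => simp [hs]
  | cons c u ih =>
      have hc : c ≠ ';' := fun h => hu (by simp [h])
      have hu' : ';' ∉ u := fun h => hu (List.mem_cons_of_mem _ h)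
      simp only [List.cons_append, segs, hc, if_false, ih hu']
      cases hs : segs v with
      | nil => exact absurd hs (segs_ne_nil v)
      | cons a t => simp [hs]

-- splitOnMax with maxsplit = 0 returns the rest unsplit
theorem splitOnMax_go_zero (fuel : Nat) (l cur : List Char) (acc : List (List Char)) :
    PySem.Chars.splitOnMax.go ['='] fuel 0 l cur acc = ((cur.reverse ++ l) :: acc).reverse := by
  cases fuel with
  | zero => rw [PySem.Chars.splitOnMax.go]
  | succ n =>
      cases l with
      | nil => rw [PySem.Chars.splitOnMax.go]; simp; omega
      | cons c rest => rw [PySem.Chars.splitOnMax.go]; simp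

theorem splitOnMax_one (pre z cur : List Char) (acc : List (List Char)) (fuel : Nat)
    (hf : (pre ++ '=' :: z).length ≤ fuel) (hpre : '=' ∉ pre) :
    PySem.Chars.splitOnMax.go ['='] fuel 1 (pre ++ '=' :: z) cur acc
      = acc.reverse ++ [cur.reverse ++ pre, z] := by
  induction pre generalizing cur acc fuel with
  | nil =>
      cases fuel with
      | zero => simp at hf
      | succ n =>
          rw [List.nil_append, PySem.Chars.splitOnMax.go]
          rw [if_neg (by omega)]
          rw [if_pos (by simp [List.isPrefixOf])]
          rw [show List.drop ['='].length ('=' :: z) = z from rfl]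
          rw [splitOnMax_go_zero]
          simp
  | cons p pre ih =>
      have hp : p ≠ '=' := fun h => hpre (by simp [h])
      have hpre' : '=' ∉ pre := fun h => hpre (List.mem_cons_of_mem _ h)
      cases fuel with
      | zero => simp at hf
      | succ n =>
          rw [List.cons_append, PySem.Chars.splitOnMax.go]
          rw [if_neg (by omega)]
          rw [if_neg (by simp [List.isPrefixOf, Ne.symm hp])]
          rw [ih (p :: cur) acc n (by simpa using Nat.le_of_succ_le_succ (by simpa using hf)) hpre']
          simp

theorem rstrip_cons (c : Char) (t : List Char) :
    PySem.Chars.rstrip (c :: t)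
      = if PySem.Chars.rstrip t = [] then (if PySem.Chars.isspace c then [] else [c])
        else c :: PySem.Chars.rstrip t := by
  unfold PySem.Chars.rstrip
  rw [List.reverse_cons, List.dropWhile_append]
  by_cases h : (List.dropWhile PySem.Chars.isspace t.reverse).isEmpty
  · have h2 : (List.dropWhile PySem.Chars.isspace t.reverse).reverse = [] := by
      simp_all [List.isEmpty_iff]
    rw [if_pos h, if_pos h2]
    by_cases hc : PySem.Chars.isspace c <;> simp [List.dropWhile_cons, hc]
  · have h2 : (List.dropWhile PySem.Chars.isspace t.reverse).reverse ≠ [] := by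
      simp_all [List.isEmpty_iff]
    rw [if_neg h, if_neg h2]
    simp

theorem rstrip_eq_nil_iff (t : List Char) :
    PySem.Chars.rstrip t = [] ↔ ∀ x ∈ t, PySem.Chars.isspace x := by
  unfold PySem.Chars.rstrip
  simp [List.dropWhile_eq_nil_iff]

theorem lstrip_rstrip_comm (t : List Char) :
    PySem.Chars.lstrip (PySem.Chars.rstrip t) = PySem.Chars.rstrip (PySem.Chars.lstrip t) := by
  induction t with
  | nil => rfl
  | cons c t ih =>
      rw [rstrip_cons]
      by_cases h0 : PySem.Chars.rstrip t = []
      · rw [if_pos h0]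
        have hall : ∀ x ∈ t, PySem.Chars.isspace x := (rstrip_eq_nil_iff t).mp h0
        have hl : PySem.Chars.lstrip t = [] := by
          unfold PySem.Chars.lstrip
          exact List.dropWhile_eq_nil_iff.mpr hall
        by_cases hc : PySem.Chars.isspace c
        · rw [if_pos hc]
          have : PySem.Chars.lstrip (c :: t) = PySem.Chars.lstrip t := by
            simp [PySem.Chars.lstrip, List.dropWhile_cons, hc]
          rw [this, hl]
          rfl
        · rw [if_neg hc]
          have : PySem.Chars.lstrip (c :: t) = c :: t := by
            simp [PySem.Chars.lstrip, List.dropWhile_cons, hc]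
          rw [this, rstrip_cons, if_pos h0, if_neg hc]
          simp [PySem.Chars.lstrip, List.dropWhile_cons, hc]
      · rw [if_neg h0]
        by_cases hc : PySem.Chars.isspace c
        · have hl : PySem.Chars.lstrip (c :: PySem.Chars.rstrip t) = PySem.Chars.lstrip (PySem.Chars.rstrip t) := by
            simp [PySem.Chars.lstrip, List.dropWhile_cons, hc]
          have hr : PySem.Chars.lstrip (c :: t) = PySem.Chars.lstrip t := by
            simp [PySem.Chars.lstrip, List.dropWhile_cons, hc]
          rw [hl, hr, ih]
        · have hl : PySem.Chars.lstrip (c :: PySem.Chars.rstrip t) = c :: PySem.Chars.rstrip t := by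
            simp [PySem.Chars.lstrip, List.dropWhile_cons, hc]
          have hr : PySem.Chars.lstrip (c :: t) = c :: t := by
            simp [PySem.Chars.lstrip, List.dropWhile_cons, hc]
          rw [hl, hr, rstrip_cons, if_neg h0]

theorem rstrip_idem (t : List Char) :
    PySem.Chars.rstrip (PySem.Chars.rstrip t) = PySem.Chars.rstrip t := by
  unfold PySem.Chars.rstrip
  rw [List.reverse_reverse, List.dropWhile_idempotent]

theorem strip_rstrip (t : List Char) :
    PySem.Chars.strip (PySem.Chars.rstrip t) = PySem.Chars.strip t := by
  show PySem.Chars.rstrip (PySem.Chars.lstrip (PySem.Chars.rstrip t)) = PySem.Chars.strip t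
  rw [lstrip_rstrip_comm, rstrip_idem]
  rfl

theorem rstrip_append (pre t : List Char) (c : Char) (hc : ¬ PySem.Chars.isspace c) :
    PySem.Chars.rstrip ((pre ++ [c]) ++ t) = (pre ++ [c]) ++ PySem.Chars.rstrip t := by
  unfold PySem.Chars.rstrip
  rw [List.reverse_append, List.dropWhile_append]
  by_cases h : (List.dropWhile PySem.Chars.isspace t.reverse).isEmpty
  · have h2 : List.dropWhile PySem.Chars.isspace t.reverse = [] := by simpa [List.isEmpty_iff] using h
    rw [if_pos h, h2]
    simp [List.reverse_append, List.dropWhile_cons, hc]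
  · rw [if_neg h]
    simp [List.reverse_append]

theorem rstrip_prefix (t : List Char) : PySem.Chars.rstrip t <+: t := by
  refine ⟨(List.takeWhile PySem.Chars.isspace t.reverse).reverse, ?_⟩
  unfold PySem.Chars.rstrip
  rw [← List.reverse_append, List.takeWhile_append_dropWhile, List.reverse_reverse]

theorem scanB_no_semi (l : List Char) (h : ';' ∉ l) : scanB l = none := by
  induction l with
  | nil => rfl
  | cons c rest ih =>
      have hc : c ≠ ';' := fun hh => h (by simp [hh])
      simp only [scanB, if_neg hc]
      exact ih (fun hh => h (List.mem_cons_of_mem _ hh))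

theorem scanB_skip (u v : List Char) (hu : ';' ∉ u) : scanB (u ++ v) = scanB v := by
  induction u with
  | nil => rfl
  | cons c u ih =>
      have hc : c ≠ ';' := fun hh => hu (by simp [hh])
      simp only [List.cons_append, scanB, if_neg hc]
      exact ih (fun hh => hu (List.mem_cons_of_mem _ hh))

-- the heart: one parameter segment, compared between the two loops.
-- u is the segment (no ';'), r the remainder (empty or starting with ';').
theorem cond_eq (u r : List Char) (hu : ';' ∉ u) (hr : r = [] ∨ ∃ t, r = ';' :: t) :
    "charset=".toList.isPrefixOf ((u ++ r).dropWhile PySem.Chars.isspace)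
      = PySem.Chars.startswith (PySem.Chars.strip u) "charset=".toList := by
  induction u with
  | nil =>
      rcases hr with rfl | ⟨t, rfl⟩
      · rfl
      · simp [List.dropWhile_cons, PySem.Chars.isspace, List.isPrefixOf,
              PySem.Chars.strip, PySem.Chars.lstrip, PySem.Chars.rstrip, PySem.Chars.startswith]
  | cons a u ih =>
      have hu' : ';' ∉ u := fun h => hu (List.mem_cons_of_mem _ h)
      by_cases ha : PySem.Chars.isspace a
      · have h1 : ((a :: u) ++ r).dropWhile PySem.Chars.isspace = (u ++ r).dropWhile PySem.Chars.isspace := by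
          simp [List.dropWhile_cons, ha]
        have h2 : PySem.Chars.strip (a :: u) = PySem.Chars.strip u := by
          simp [PySem.Chars.strip, PySem.Chars.lstrip, List.dropWhile_cons, ha]
        rw [h1, h2, ih hu']
      · have h1 : ((a :: u) ++ r).dropWhile PySem.Chars.isspace = (a :: u) ++ r := by
          simp [List.dropWhile_cons, ha]
        have h2 : PySem.Chars.strip (a :: u) = PySem.Chars.rstrip (a :: u) := by
          simp [PySem.Chars.strip, PySem.Chars.lstrip, List.dropWhile_cons, ha]
        rw [h1, h2]
        by_cases hp : "charset=".toList <+: ((a :: u) ++ r)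
        · -- the prefix lies inside a :: u (the pattern contains no ';')
          have hpu : "charset=".toList <+: (a :: u) := by
            rcases hr with rfl | ⟨t, rfl⟩
            · simpa using hp
            · have htake := List.prefix_iff_eq_take.mp hp
              by_cases hlen : "charset=".toList.length ≤ (a :: u).length
              · refine List.prefix_iff_eq_take.mpr ?_
                conv_lhs => rw [htake]
                rw [List.take_append, Nat.sub_eq_zero_of_le hlen, List.take_zero,
                    List.append_nil]
              · exfalso
                have hmem : ';' ∈ "charset=".toList := by
                  rw [htake, List.take_append]
                  refine List.mem_append_right _ ?_
                  have : 0 < "charset=".toList.length - (a :: u).length := by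
                    simp only [List.length_cons] at *
                    omega
                  cases hk : "charset=".toList.length - (a :: u).length with
                  | zero => omega
                  | succ k => simp [List.take_cons]
                revert hmem
                decide
          obtain ⟨tail8, htail⟩ := hpu
          have h8 : PySem.Chars.rstrip (a :: u) = "charset=".toList ++ PySem.Chars.rstrip tail8 := by
            rw [← htail, show ("charset=".toList : List Char) = "charset".toList ++ ['='] from rfl]
            exact rstrip_append _ _ _ (by decide)
          rw [h8]
          have hb : "charset=".toList.isPrefixOf ((a :: u) ++ r) = true :=
            List.isPrefixOf_iff_prefix.mpr hp
          have hb2 : PySem.Chars.startswith ("charset=".toList ++ PySem.Chars.rstrip tail8) "charset=".toList = true := by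
            unfold PySem.Chars.startswith
            exact List.isPrefixOf_iff_prefix.mpr (List.prefix_append _ _)
          rw [hb, hb2]
        · have hb : "charset=".toList.isPrefixOf ((a :: u) ++ r) = false := by
            rw [Bool.eq_false_iff]
            intro hh
            exact hp (List.isPrefixOf_iff_prefix.mp hh)
          have hb2 : PySem.Chars.startswith (PySem.Chars.rstrip (a :: u)) "charset=".toList = false := by
            rw [Bool.eq_false_iff]
            intro hh
            have h1 : "charset=".toList <+: PySem.Chars.rstrip (a :: u) :=
              List.isPrefixOf_iff_prefix.mp hh
            exact hp ((h1.trans (rstrip_prefix _)).trans (List.prefix_append _ _))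
          rw [hb, hb2]

theorem val_eq (u r : List Char) (hu : ';' ∉ u) (hr : r = [] ∨ ∃ t, r = ';' :: t)
    (h : PySem.Chars.startswith (PySem.Chars.strip u) "charset=".toList = true) :
    PySem.Chars.strip ((((u ++ r).dropWhile PySem.Chars.isspace).drop 8).takeWhile (· ≠ ';'))
      = PySem.Chars.strip ((PySem.List.pyGet? (PySem.Chars.splitOnMax (PySem.Chars.strip u) "=".toList 1) 1).getD []) := by
  induction u with
  | nil =>
      exfalso
      have : PySem.Chars.strip ([] : List Char) = [] := rfl
      rw [this] at h
      exact absurd h (by decide)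
  | cons a u ih =>
      have hu' : ';' ∉ u := fun hh => hu (List.mem_cons_of_mem _ hh)
      by_cases ha : PySem.Chars.isspace a
      · have h1 : ((a :: u) ++ r).dropWhile PySem.Chars.isspace = (u ++ r).dropWhile PySem.Chars.isspace := by
          simp [List.dropWhile_cons, ha]
        have h2 : PySem.Chars.strip (a :: u) = PySem.Chars.strip u := by
          simp [PySem.Chars.strip, PySem.Chars.lstrip, List.dropWhile_cons, ha]
        rw [h2] at h
        rw [h1, h2, ih hu' h]
      · have h1 : ((a :: u) ++ r).dropWhile PySem.Chars.isspace = (a :: u) ++ r := by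
          simp [List.dropWhile_cons, ha]
        have h2 : PySem.Chars.strip (a :: u) = PySem.Chars.rstrip (a :: u) := by
          simp [PySem.Chars.strip, PySem.Chars.lstrip, List.dropWhile_cons, ha]
        rw [h2] at h
        have hpq : "charset=".toList <+: PySem.Chars.rstrip (a :: u) :=
          List.isPrefixOf_iff_prefix.mp h
        have hpu : "charset=".toList <+: (a :: u) := hpq.trans (rstrip_prefix _)
        obtain ⟨tail8, htail⟩ := hpu
        have h8 : PySem.Chars.rstrip (a :: u) = "charset=".toList ++ PySem.Chars.rstrip tail8 := by
          rw [← htail, show ("charset=".toList : List Char) = "charset".toList ++ ['='] from rfl]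
          exact rstrip_append _ _ _ (by decide)
        have hts : ';' ∉ tail8 := by
          intro hm
          exact hu (htail ▸ List.mem_append_right _ hm)
        -- left side: drop the 8 pattern characters, take to the next ';' = tail8
        have hL : (((a :: u) ++ r).drop 8).takeWhile (· ≠ ';') = tail8 := by
          rw [← htail, List.append_assoc,
              show (8 : Nat) = ("charset=".toList : List Char).length from rfl, List.drop_left]
          rw [List.takeWhile_append_of_pos (by
            intro x hx
            have hx' : x ≠ ';' := fun hsemi => hts (hsemi ▸ hx)
            simpa using hx')]
          rcases hr with rfl | ⟨t, rfl⟩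
          · simp
          · simp [List.takeWhile_cons]
        -- right side: split "charset=<z>" at the first '=' gives z
        have hR : (PySem.List.pyGet? (PySem.Chars.splitOnMax (PySem.Chars.rstrip (a :: u)) "=".toList 1) 1).getD []
            = PySem.Chars.rstrip tail8 := by
          rw [h8]
          unfold PySem.Chars.splitOnMax
          rw [if_neg (by omega)]
          rw [show ("=".toList : List Char) = ['='] from rfl,
              show ((1 : Int)).toNat = 1 from rfl]
          rw [show ("charset=".toList ++ PySem.Chars.rstrip tail8 : List Char)
                = "charset".toList ++ '=' :: PySem.Chars.rstrip tail8 from by simp]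
          rw [splitOnMax_one "charset".toList (PySem.Chars.rstrip tail8) [] []
                _ (Nat.le_succ _) (by decide)]
          rfl
        rw [h1, h2, hL, hR, strip_rstrip]

theorem dropWhile_semi (l : List Char) :
    l.dropWhile (· ≠ ';') = [] ∨ ∃ t, l.dropWhile (· ≠ ';') = ';' :: t := by
  induction l with
  | nil => exact Or.inl rfl
  | cons c r ih =>
      by_cases hc : c = ';'
      · subst hc
        exact Or.inr ⟨r, by simp [List.dropWhile_cons]⟩
      · simpa [List.dropWhile_cons, hc] using ih

theorem scanB_semi (n : Nat) : ∀ l : List Char, l.length ≤ n → scanB (';' :: l) = pickLoopA (segs l) := by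
  induction n with
  | zero =>
      intro l hl
      have : l = [] := List.length_eq_zero_iff.mp (Nat.le_zero.mp hl)
      subst this
      decide
  | succ n ih =>
      intro l hl
      obtain ⟨u, r, hur, hu, hr⟩ :
          ∃ u r, l = u ++ r ∧ ';' ∉ u ∧ (r = [] ∨ ∃ t, r = ';' :: t) := by
        refine ⟨l.takeWhile (· ≠ ';'), l.dropWhile (· ≠ ';'),
          List.takeWhile_append_dropWhile.symm, ?_, ?_⟩
        · intro hm
          have := List.mem_takeWhile_imp hm
          simp at this
        · exact dropWhile_semi l
      subst hur
      have hcondeq : (((u ++ r).dropWhile PySem.Chars.isspace).take 8 = "charset=".toList)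
          ↔ (PySem.Chars.startswith (PySem.Chars.strip u) "charset=".toList = true) := by
        rw [take8_iff, cond_eq _ _ hu hr]
      have hscan : scanB (';' :: (u ++ r))
          = (if ((u ++ r).dropWhile PySem.Chars.isspace).take 8 = "charset=".toList then
              some (trimBy (· == '\'') (trimBy (· == '"')
                      (trimBy PySem.Chars.isspace
                        ((((u ++ r).dropWhile PySem.Chars.isspace).drop 8).takeWhile (· ≠ ';')))))
             else scanB (u ++ r)) := by
        simp [scanB]
      have hval : trimBy (· == '\'') (trimBy (· == '"')
              (trimBy PySem.Chars.isspace
                ((((u ++ r).dropWhile PySem.Chars.isspace).drop 8).takeWhile (· ≠ ';'))))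
          = PySem.Chars.stripChars
              (PySem.Chars.stripChars
                (PySem.Chars.strip
                  ((((u ++ r).dropWhile PySem.Chars.isspace).drop 8).takeWhile (· ≠ ';')))
                "\"".toList)
              "'".toList := by
        rw [trimBy_isspace, trimBy_quote, trimBy_quote]
        rfl
      rw [hscan, segs_append _ _ hu]
      rcases hr with rfl | ⟨t, rfl⟩
      · rw [show segs ([] : List Char) = [[]] from rfl]
        rw [show ([[]] : List (List Char)).modifyHead (u ++ ·) = [u] from by simp]
        simp only [pickLoopA]
        by_cases hcond : PySem.Chars.startswith (PySem.Chars.strip u) "charset=".toList = true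
        · rw [if_pos (hcondeq.mpr hcond), if_pos hcond, hval, val_eq _ _ hu (Or.inl rfl) hcond]
        · rw [if_neg (fun hh => hcond (hcondeq.mp hh)), if_neg hcond,
              scanB_no_semi (u ++ []) (by simpa using hu)]
      · rw [show segs (';' :: t) = [] :: segs t from by simp [segs]]
        rw [show (([] :: segs t).modifyHead (u ++ ·)) = (u ++ []) :: segs t from by simp]
        rw [List.append_nil]
        simp only [pickLoopA]
        by_cases hcond : PySem.Chars.startswith (PySem.Chars.strip u) "charset=".toList = true
        · rw [if_pos (hcondeq.mpr hcond), if_pos hcond, hval, val_eq _ _ hu (Or.inr ⟨t, rfl⟩) hcond]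
        · rw [if_neg (fun hh => hcond (hcondeq.mp hh)), if_neg hcond]
          have htlen : t.length ≤ n := by
            simp only [List.length_append, List.length_cons] at hl
            omega
          rw [scanB_skip _ _ hu]
          exact ih t htlen

theorem scan_eq_loop (l : List Char) : scanB l = pickLoopA ((segs l).drop 1) := by
  induction l with
  | nil => decide
  | cons c rest ih =>
      by_cases hc : c = ';'
      · subst hc
        rw [show segs (';' :: rest) = [] :: segs rest from by simp [segs]]
        rw [List.drop_one, List.tail_cons]
        exact scanB_semi rest.length rest le_rfl
      · rw [show scanB (c :: rest) = scanB rest from by simp [scanB, hc]]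
        rw [ih]
        congr 1
        rw [show segs (c :: rest) = (segs rest).modifyHead (c :: ·) from by simp [segs, hc]]
        rw [List.drop_one, List.drop_one, List.tail_modifyHead]

theorem lower_nil_of_isEmpty (s : String) (h : s.toList.isEmpty) :
    PySem.Chars.lower s.toList = [] := by
  rw [List.isEmpty_iff.mp h]
  rfl

-- ===== VERDICT (by name: the statement is the Claim_ definition above) =====
theorem pick_charset_py_spec : Claim_equal_pick_charset_py := by
  intro raw _
  unfold Spec_pick_charset_py pick_charset_py pick_charset_py_alt
  cases raw with
  | none => rfl
  | some s =>
      simp only []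
      by_cases he : s.toList.isEmpty
      · rw [if_pos he, lower_nil_of_isEmpty s he]
        rfl
      · rw [if_neg he]
        rw [PySem.List.slice_from, show ((1 : Int)).toNat = 1 from rfl,
            show (";".toList : List Char) = [';'] from rfl,
            splitOn_eq_segs, ← scan_eq_loop]
        norm_num
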